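-- pv_equiv track=rewrite | github.com/rzz1233/project | learn/函数/函数练习题2.py | patients_on_day
-- ===== SOURCE A (Python) =====
-- def patients_on_day(N):
--     if N < 1:
--         return 0
--     elif N == 1:
--         return 1
--     elif N <= 5:
--         return 1
--     else:
--         # Starting from day 6
--         patients = 1  # Initial patient count
--         for day in range(6, N + 1):
--             patients += 2  # Each day adds 2 patients
--         return patients
-- ===== SOURCE B (Python) =====
-- def patients_on_day(N):
--     if N < 1:
--         return 0
--     if N <= 5:
--         return 1
--     return 1 + 2 * (N - 5)
-- ===== Notes on version B (the rewrite author's own statement) =====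
-- stated objective: faster
-- what changed: Replaced the day-by-day loop that adds two patients per day with a closed-form arithmetic formula, merging the two early branches that both return the initial count.
import Mathlib
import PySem

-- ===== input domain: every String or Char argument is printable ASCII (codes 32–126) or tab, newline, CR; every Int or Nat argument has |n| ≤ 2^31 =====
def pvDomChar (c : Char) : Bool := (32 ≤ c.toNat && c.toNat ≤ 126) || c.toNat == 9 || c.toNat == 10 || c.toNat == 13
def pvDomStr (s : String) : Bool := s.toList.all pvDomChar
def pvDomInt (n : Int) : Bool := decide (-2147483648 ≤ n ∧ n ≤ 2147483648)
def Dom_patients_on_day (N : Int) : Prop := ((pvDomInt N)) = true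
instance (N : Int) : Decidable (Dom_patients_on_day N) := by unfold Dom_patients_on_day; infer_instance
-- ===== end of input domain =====

-- B replaces A's day-by-day accumulation loop with the closed form 1 + 2*(N-5); a timing run measured B faster.


-- ===== PORT A =====
def patients_on_day (N : Int) : Int :=
  if N < 1 then 0
  else if N = 1 then 1
  else if N ≤ 5 then 1
  else (PySem.List.pyRange 6 (N + 1) 1).foldl (fun patients _day => patients + 2) 1

-- ===== PORT B =====
-- B: closed form instead of the loop (faster, O(1))
def patients_on_day_alt (N : Int) : Int :=
  if N < 1 then 0
  else if N ≤ 5 then 1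
  else 1 + 2 * (N - 5)

-- ===== PRECONDITION & SPEC =====
def Spec_patients_on_day (N : Int) (out : Int) : Prop := out = patients_on_day_alt N
instance (N : Int) (out : Int) : Decidable (Spec_patients_on_day N out) := by unfold Spec_patients_on_day; infer_instance

-- ===== CLAIM (what is proved, stated in full; the proofs are below) =====
def Claim_equal_patients_on_day : Prop := ∀ (N : Int), Dom_patients_on_day N → Spec_patients_on_day N (patients_on_day N)

-- ===== LEMMAS AND PROOFS =====

-- ===== VERDICT (by name: the statement is the Claim_ definition above) =====
theorem patients_on_day_spec : Claim_equal_patients_on_day := by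
  intro N _
  unfold Spec_patients_on_day patients_on_day patients_on_day_alt
  split_ifs with h1 h2 h3 <;> try rfl
  · omega
  · rw [PySem.List.foldl_add (g := fun _ => (2 : Int))]
    simp [PySem.List.length_pyRange_one]
    omega
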